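-- pv_equiv track=rewrite | github.com/kvmilos/PD-Szyfr | szyfr/szyfr.py | isUnequivocal
-- ===== SOURCE A (Python) =====
-- def isUnequivocal(text):
--     if len(text) % 2 == 1:
--         return False
--     a = {}
--     for i in range(0, len(text), 2):
--         if text[i] not in a:
--             a[text[i]] = text[i+1]
--         elif text[i+1] != a[text[i]]:
--             return False
--         if text[i+1] not in a:
--             a[text[i+1]] = text[i]
--         elif text[i] != a[text[i+1]]:
--             return False
--     return True
-- ===== SOURCE B (Python) =====
-- def isUnequivocal(text):
--     # A pairing is unequivocal iff the length is even and the DISTINCT normalized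
--     # (sorted) two-character blocks cover pairwise-disjoint sets of characters:
--     # canonicalize every block, deduplicate, then check all covered characters
--     # are globally distinct.  No partner map, no early exit.
--     if len(text) % 2 == 1:
--         return False
--     pairs = set()
--     for i in range(0, len(text), 2):
--         x, y = text[i], text[i + 1]
--         pairs.add((min(x, y), max(x, y)))
--     chars = [c for p in pairs for c in ((p[0],) if p[0] == p[1] else p)]
--     return len(chars) == len(set(chars))
-- ===== Notes on version B (the rewrite author's own statement) =====
-- stated objective: alternative
-- what changed: B replaces A's incrementally maintained bidirectional partner dict with early returns by a canonical-form algorithm: it normalizes every two-character block to a sorted pair, deduplicates them into a set, and finally accepts iff the length is even and the characters covered by the distinct pairs are globally distinct.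
import Mathlib
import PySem

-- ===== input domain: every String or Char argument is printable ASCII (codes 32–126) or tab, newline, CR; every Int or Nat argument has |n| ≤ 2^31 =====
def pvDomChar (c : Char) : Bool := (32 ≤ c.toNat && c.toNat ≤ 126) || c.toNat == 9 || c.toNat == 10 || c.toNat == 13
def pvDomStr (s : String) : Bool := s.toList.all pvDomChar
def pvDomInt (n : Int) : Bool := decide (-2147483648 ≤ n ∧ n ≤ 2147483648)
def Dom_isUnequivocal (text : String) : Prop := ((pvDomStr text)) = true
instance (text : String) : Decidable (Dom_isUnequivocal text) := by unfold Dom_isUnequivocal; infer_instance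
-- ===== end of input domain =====

-- B replaces A's incrementally maintained bidirectional partner dict (with early
-- returns) by a canonical-form algorithm: normalize every two-character block to a
-- sorted pair, deduplicate into a set, then accept iff the length is even and the
-- characters covered by the distinct pairs are globally distinct; objective: alternative.

-- ===== PORT A =====
-- literal transliteration of A's loop: for i in range(0, len(text), 2) with early return
def loopA (cs : List Char) : List Int → PySem.Dict Char Char → Bool
  | [], _ => true
  | i :: rest, a =>
    match PySem.List.pyGet? cs i, PySem.List.pyGet? cs (i + 1) with
    | some x, some y =>
      match a.get? x with      -- 'text[i] not in a' / 'a[text[i]]'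
      | none =>
        let a1 := a.insert x y
        match a1.get? y with   -- 'text[i+1] not in a' / 'a[text[i+1]]'
        | none => loopA cs rest (a1.insert y x)
        | some w => if x ≠ w then false else loopA cs rest a1
      | some v =>
        if y ≠ v then false
        else
          match a.get? y with
          | none => loopA cs rest (a.insert y x)
          | some w => if x ≠ w then false else loopA cs rest a
    | _, _ => false            -- unreachable: every index of range(0, len, 2) is in range

def isUnequivocal (text : String) : Bool :=
  if PySem.Str.len text % 2 == 1 then false
  else loopA text.toList (PySem.List.pyRange 0 (PySem.Str.len text) 2) PySem.Dict.empty

-- ===== PORT B =====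
-- (min(x, y), max(x, y)) for two single characters, literally
def normPair (x y : Char) : Char × Char :=
  ((if x ≤ y then x else y), (if y ≤ x then x else y))

-- the characters a normalized pair covers: (p[0],) if p[0] == p[1] else p
def chars2 (p : Char × Char) : List Char :=
  if p.1 = p.2 then [p.1] else [p.1, p.2]

def isUnequivocal_alt (text : String) : Bool :=
  if PySem.Str.len text % 2 == 1 then false
  else
    let cs := text.toList
    let pairs : PySem.Set (Char × Char) :=
      (PySem.List.pyRange 0 (PySem.Str.len text) 2).foldl
        (fun s i =>
          match PySem.List.pyGet? cs i, PySem.List.pyGet? cs (i + 1) with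
          | some x, some y => PySem.Set.add s (normPair x y)
          | _, _ => s) PySem.Set.empty   -- unreachable fallback: i, i+1 in range
    let chars : List Char := pairs.flatMap chars2
    decide (chars.length = (PySem.Set.ofList chars).length)

-- ===== PRECONDITION & SPEC =====
def Spec_isUnequivocal (text : String) (out : Bool) : Prop := out = isUnequivocal_alt text
instance (text : String) (out : Bool) : Decidable (Spec_isUnequivocal text out) := by unfold Spec_isUnequivocal; infer_instance

-- ===== CLAIM (what is proved, stated in full; the proofs are below) =====
def Claim_equal_isUnequivocal : Prop := ∀ (text : String), Dom_isUnequivocal text → Spec_isUnequivocal text (isUnequivocal text)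

-- ===== LEMMAS AND PROOFS =====

-- the list of (text[i], text[i+1]) pairs both loops walk over
def pairsOf : List Char → List (Char × Char)
  | x :: y :: l => (x, y) :: pairsOf l
  | _ => []

def snorm (p : Char × Char) : Char × Char := if p.1 ≤ p.2 then p else (p.2, p.1)

theorem normPair_eq_snorm (x y : Char) : normPair x y = snorm (x, y) := by
  unfold normPair snorm
  by_cases h : x ≤ y
  · simp only [if_pos h]
    by_cases h' : y ≤ x
    · have h2 : x = y := le_antisymm h h'
      simp [h2]
    · simp [h']
  · have h' : y ≤ x := le_of_not_ge h
    simp [h, h']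

-- A's per-character half-step: none = 'return False'
def halfA (a : PySem.Dict Char Char) (u w : Char) : Option (PySem.Dict Char Char) :=
  match a.get? u with
  | none => some (a.insert u w)
  | some v => if w ≠ v then none else some a

def runA : List (Char × Char) → PySem.Dict Char Char → Bool
  | [], _ => true
  | (x, y) :: rest, a =>
    match halfA a x y with
    | none => false
    | some a1 =>
      match halfA a1 y x with
      | none => false
      | some a2 => runA rest a2

-- B's accumulation of distinct normalized pairs
def runB (ps : List (Char × Char)) (Q : PySem.Set (Char × Char)) : PySem.Set (Char × Char) :=
  ps.foldl (fun Q p => PySem.Set.add Q (snorm p)) Q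

def charsOf (Q : List (Char × Char)) : List Char := Q.flatMap chars2

-- the partner A's dict records for c, read off the distinct-pair list
def lookupQ (Q : List (Char × Char)) (c : Char) : Option Char :=
  (Q.find? (fun q => q.1 == c || q.2 == c)).map (fun q => if q.1 = c then q.2 else q.1)

-- basic facts about chars2 / charsOf / lookupQ ------------------------------

theorem mem_chars2 {c : Char} {p : Char × Char} : c ∈ chars2 p ↔ p.1 = c ∨ p.2 = c := by
  unfold chars2
  split_ifs with h
  · simp only [List.mem_singleton, ← h, or_self]
    exact eq_comm
  · simp [eq_comm]

theorem charsOf_append (Q R : List (Char × Char)) :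
    charsOf (Q ++ R) = charsOf Q ++ charsOf R := by
  unfold charsOf; simp

theorem mem_charsOf {c : Char} {Q : List (Char × Char)} :
    c ∈ charsOf Q ↔ ∃ q ∈ Q, q.1 = c ∨ q.2 = c := by
  unfold charsOf
  simp only [List.mem_flatMap]
  constructor
  · rintro ⟨q, hq, hc⟩; exact ⟨q, hq, mem_chars2.mp hc⟩
  · rintro ⟨q, hq, hc⟩; exact ⟨q, hq, mem_chars2.mpr hc⟩

theorem lookupQ_eq_none {Q : List (Char × Char)} {c : Char} :
    lookupQ Q c = none ↔ c ∉ charsOf Q := by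
  unfold lookupQ
  rw [Option.map_eq_none_iff, List.find?_eq_none, mem_charsOf]
  constructor
  · rintro h ⟨q, hq, hc⟩
    exact absurd (by simpa using hc) (by simpa using h q hq)
  · intro h q hq
    simp only [Bool.or_eq_true, beq_iff_eq] at *
    exact fun hc => h ⟨q, hq, hc⟩

theorem lookupQ_cons (q : Char × Char) (Q : List (Char × Char)) (c : Char) :
    lookupQ (q :: Q) c =
      if q.1 = c ∨ q.2 = c then some (if q.1 = c then q.2 else q.1) else lookupQ Q c := by
  unfold lookupQ
  by_cases h : q.1 = c ∨ q.2 = c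
  · rw [List.find?_cons_of_pos (by simpa using h), if_pos h]
    rfl
  · rw [List.find?_cons_of_neg (by simpa using h), if_neg h]

theorem lookupQ_unique {Q : List (Char × Char)} {q : Char × Char} {c : Char}
    (hnd : (charsOf Q).Nodup) (hq : q ∈ Q) (hc : q.1 = c ∨ q.2 = c) :
    lookupQ Q c = some (if q.1 = c then q.2 else q.1) := by
  induction Q with
  | nil => cases hq
  | cons q0 Q ih =>
    have hsplit : charsOf (q0 :: Q) = chars2 q0 ++ charsOf Q := rfl
    rw [hsplit] at hnd
    have hdisj := List.disjoint_of_nodup_append hnd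
    rw [lookupQ_cons]
    rcases List.mem_cons.mp hq with rfl | hmem
    · rw [if_pos hc]
    · have hcQ : c ∈ charsOf Q := mem_charsOf.mpr ⟨q, hmem, hc⟩
      have hnc : ¬ (q0.1 = c ∨ q0.2 = c) := by
        intro h0
        exact hdisj (mem_chars2.mpr h0) hcQ
      rw [if_neg hnc]
      exact ih (hnd.of_append_right) hmem

theorem lookupQ_some {Q : List (Char × Char)} {c d : Char}
    (h : lookupQ Q c = some d) :
    ∃ q ∈ Q, (q.1 = c ∧ q.2 = d) ∨ (q.2 = c ∧ q.1 = d) := by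
  unfold lookupQ at h
  rw [Option.map_eq_some_iff] at h
  obtain ⟨q, hfind, hd⟩ := h
  refine ⟨q, List.mem_of_find?_eq_some hfind, ?_⟩
  have hpred := List.find?_some hfind
  simp only [Bool.or_eq_true, beq_iff_eq] at hpred
  by_cases h1 : q.1 = c
  · left; exact ⟨h1, by rw [← hd, if_pos h1]⟩
  · right; exact ⟨hpred.resolve_left h1, by rw [← hd, if_neg h1]⟩

theorem lookupQ_append_single (Q : List (Char × Char)) (n : Char × Char) (c : Char) :
    lookupQ (Q ++ [n]) c = (lookupQ Q c).or (lookupQ [n] c) := by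
  unfold lookupQ
  rw [List.find?_append]
  cases List.find? (fun q => q.1 == c || q.2 == c) Q <;> simp

-- snorm facts ----------------------------------------------------------------

theorem snorm_cases (x y : Char) : snorm (x, y) = (x, y) ∨ snorm (x, y) = (y, x) := by
  unfold snorm; split_ifs <;> simp

theorem snorm_comm (a b : Char) : snorm (a, b) = snorm (b, a) := by
  unfold snorm
  by_cases h1 : a ≤ b <;> by_cases h2 : b ≤ a
  · have h : a = b := le_antisymm h1 h2
    simp [h]
  · simp [h1, h2]
  · simp [h1, h2]
  · exact absurd (le_of_not_ge h1) h2

theorem snorm_idem (x y : Char) : snorm (snorm (x, y)) = snorm (x, y) := by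
  unfold snorm
  by_cases h : x ≤ y
  · simp [h]
  · have h' : y ≤ x := le_of_not_ge h
    simp [h, h']

theorem chars2_snorm_fst {x y : Char} : x ∈ chars2 (snorm (x, y)) := by
  rcases snorm_cases x y with h | h <;> rw [h] <;> exact mem_chars2.mpr (by simp)

theorem chars2_snorm_snd {x y : Char} : y ∈ chars2 (snorm (x, y)) := by
  rcases snorm_cases x y with h | h <;> rw [h] <;> exact mem_chars2.mpr (by simp)

theorem lookup_single_fst (x y : Char) : lookupQ [snorm (x, y)] x = some y := by
  rcases snorm_cases x y with h | h <;> rw [h, lookupQ_cons]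
  · simp
  · by_cases hyx : y = x
    · simp [hyx]
    · simp [hyx]

theorem lookup_single_snd (x y : Char) : lookupQ [snorm (x, y)] y = some x := by
  rw [snorm_comm]; exact lookup_single_fst y x

theorem lookup_single_none {x y c : Char} (hx : c ≠ x) (hy : c ≠ y) :
    lookupQ [snorm (x, y)] c = none := by
  rcases snorm_cases x y with h | h <;> rw [h, lookupQ_cons] <;>
    simp [hx.symm, hy.symm, lookupQ]

-- runB only appends ----------------------------------------------------------

theorem runB_prefix (ps : List (Char × Char)) :
    ∀ Q : List (Char × Char), ∃ R, runB ps Q = Q ++ R := by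
  induction ps with
  | nil => intro Q; exact ⟨[], by simp [runB]⟩
  | cons p rest ih =>
    intro Q
    have hstep : runB (p :: rest) Q = runB rest (PySem.Set.add Q (snorm p)) := rfl
    rw [hstep, PySem.Set.add_eq_ite]
    split_ifs with hmem
    · exact ih Q
    · obtain ⟨R, hR⟩ := ih (Q ++ [snorm p])
      exact ⟨snorm p :: R, by simpa using hR⟩

theorem not_nodup_runB {Q : List (Char × Char)} (h : ¬ (charsOf Q).Nodup)
    (ps : List (Char × Char)) : ¬ (charsOf (runB ps Q)).Nodup := by
  obtain ⟨R, hR⟩ := runB_prefix ps Q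
  rw [hR, charsOf_append]
  exact fun hnd => h hnd.of_append_left

-- invariant maintenance for the fresh-pair case ------------------------------

theorem inv_append {a : PySem.Dict Char Char} {Q : List (Char × Char)} {x y : Char}
    (hinv : ∀ c, a.get? c = lookupQ Q c)
    (hx : lookupQ Q x = none) (hy : lookupQ Q y = none) :
    ∀ c, ((a.insert x y).insert y x).get? c = lookupQ (Q ++ [snorm (x, y)]) c := by
  intro c
  rw [PySem.Dict.get?_insert, PySem.Dict.get?_insert, lookupQ_append_single]
  by_cases hcy : c = y
  · subst hcy
    rw [if_pos rfl, hy, lookup_single_snd]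
    rfl
  · rw [if_neg hcy]
    by_cases hcx : c = x
    · subst hcx
      rw [if_pos rfl, hx, lookup_single_fst]
      rfl
    · rw [if_neg hcx, hinv c, lookup_single_none hcx hcy]
      cases lookupQ Q c <;> rfl

theorem inv_append_diag {a : PySem.Dict Char Char} {Q : List (Char × Char)} {x : Char}
    (hinv : ∀ c, a.get? c = lookupQ Q c) (hx : lookupQ Q x = none) :
    ∀ c, (a.insert x x).get? c = lookupQ (Q ++ [snorm (x, x)]) c := by
  intro c
  rw [PySem.Dict.get?_insert, lookupQ_append_single]
  by_cases hcx : c = x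
  · subst hcx
    rw [if_pos rfl, hx, lookup_single_fst]
    rfl
  · rw [if_neg hcx, hinv c, lookup_single_none hcx hcx]
    cases lookupQ Q c <;> rfl

-- the core invariant argument -----------------------------------------------

theorem core (ps : List (Char × Char)) :
    ∀ (a : PySem.Dict Char Char) (Q : List (Char × Char)),
      (charsOf Q).Nodup → (∀ q ∈ Q, snorm q = q) → (∀ c, a.get? c = lookupQ Q c) →
      runA ps a = decide (charsOf (runB ps Q)).Nodup := by
  induction ps with
  | nil =>
    intro a Q hnd _ _
    simp [runA, runB, hnd]
  | cons p rest ih =>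
    obtain ⟨x, y⟩ := p
    intro a Q hnd hnorm hinv
    set n := snorm (x, y) with hn
    have hstep : runB ((x, y) :: rest) Q = runB rest (PySem.Set.add Q n) := rfl
    have hxn : x ∈ chars2 n := chars2_snorm_fst
    have hyn : y ∈ chars2 n := chars2_snorm_snd
    rw [hstep]
    show (match halfA a x y with
      | none => false
      | some a1 =>
        match halfA a1 y x with
        | none => false
        | some a2 => runA rest a2) = _
    cases hx : a.get? x with
    | some v =>
      -- x already has a partner v; some q ∈ Q contains x with partner v
      rw [hinv x] at hx
      obtain ⟨q, hqQ, hq⟩ := lookupQ_some hx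
      simp only [halfA, hinv x, hx]
      by_cases hv : y = v
      · -- consistent: q is exactly n, nothing changes
        subst hv
        have hqn : q = n := by
          rcases hq with ⟨h1, h2⟩ | ⟨h1, h2⟩
          · rw [← hnorm q hqQ, hn, ← h1, ← h2]
          · rw [← hnorm q hqQ, hn, ← h1, ← h2, snorm_comm]
        have hnQ : n ∈ Q := hqn ▸ hqQ
        have hadd : PySem.Set.add Q n = Q := PySem.Set.add_of_mem hnQ
        rw [hadd]
        simp only [ne_eq, not_true_eq_false, if_false]
        -- second half: a.get? y = some x
        have hy2 : lookupQ Q y = some x := by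
          have hyq : q.1 = y ∨ q.2 = y := by
            rcases hq with ⟨h1, h2⟩ | ⟨h1, h2⟩
            · right; exact h2
            · left; exact h2
          rw [lookupQ_unique hnd hqQ hyq]
          rcases hq with ⟨h1, h2⟩ | ⟨h1, h2⟩
          · by_cases hxy : q.1 = y
            · have hx2 : x = y := h1 ▸ hxy
              rw [if_pos hxy, h2, hx2]
            · rw [if_neg hxy, h1]
          · rw [if_pos h2, h1]
        simp only [hinv y, hy2, not_true_eq_false, if_false]
        exact ih a Q hnd hnorm hinv
      · -- conflict: A fails; n shares x with q but n ≠ q, so chars get a duplicate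
        rw [if_pos hv]
        have hnQ : n ∉ Q := by
          intro hnQ
          have hxq : q.1 = x ∨ q.2 = x := by
            rcases hq with ⟨h1, _⟩ | ⟨h1, _⟩
            · left; exact h1
            · right; exact h1
          have hxnn : n.1 = x ∨ n.2 = x := mem_chars2.mp hxn
          have h1 := lookupQ_unique hnd hqQ hxq
          have h2 := lookupQ_unique hnd hnQ hxnn
          rw [h1] at h2
          have hpq : (if q.1 = x then q.2 else q.1) = v := by
            rcases hq with ⟨ha, hb⟩ | ⟨ha, hb⟩
            · rw [if_pos ha, hb]
            · by_cases hc : q.1 = x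
              · rw [if_pos hc, ha, ← hc]
                exact hb
              · rw [if_neg hc]
                exact hb
          have hpn : (if n.1 = x then n.2 else n.1) = y := by
            rcases snorm_cases x y with h | h
            · rw [hn, h]
              simp
            · rw [hn, h]
              by_cases hc : y = x
              · simp [hc]
              · simp [hc]
          rw [hpq, hpn] at h2
          exact hv (by injection h2 with h2'; exact h2'.symm)
        have hadd : PySem.Set.add Q n = Q ++ [n] := PySem.Set.add_of_not_mem hnQ
        rw [hadd]
        have hxQ : x ∈ charsOf Q := by
          refine mem_charsOf.mpr ⟨q, hqQ, ?_⟩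
          rcases hq with ⟨h1, _⟩ | ⟨h1, _⟩
          · left; exact h1
          · right; exact h1
        have hbad : ¬ (charsOf (Q ++ [n])).Nodup := by
          rw [charsOf_append]
          intro hnd2
          have hdisj := List.disjoint_of_nodup_append hnd2
          exact hdisj hxQ (by simpa [charsOf] using hxn)
        rw [Bool.eq_iff_iff]
        simp [not_nodup_runB hbad rest]
    | none =>
      -- x is fresh
      rw [hinv x] at hx
      have hxQ : x ∈ charsOf Q → False := fun h => lookupQ_eq_none.mp hx h
      simp only [halfA, hinv x, hx]
      by_cases hxy : x = y
      · -- x = y: a[x] = x is inserted, then read straight back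
        subst hxy
        rw [PySem.Dict.get?_insert, if_pos rfl]
        simp only [ne_eq, not_true_eq_false, if_false]
        have hnQ : n ∉ Q := fun hnQ => hxQ (mem_charsOf.mpr ⟨n, hnQ, mem_chars2.mp hxn⟩)
        have hadd : PySem.Set.add Q n = Q ++ [n] := PySem.Set.add_of_not_mem hnQ
        rw [hadd]
        have hnd' : (charsOf (Q ++ [n])).Nodup := by
          rw [charsOf_append]
          refine List.Nodup.append hnd ?_ ?_
          · show (chars2 n ++ []).Nodup
            rw [List.append_nil]
            unfold chars2
            split_ifs with hcc
            · exact List.nodup_singleton _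
            · simp [hcc]
          · intro c hcQ hc2
            have hcn : n.1 = c ∨ n.2 = c := mem_chars2.mp (by simpa [charsOf] using hc2)
            have hcx : c = x := by
              rcases snorm_cases x x with h | h <;> rw [hn, h] at hcn <;> tauto
            exact hxQ (hcx ▸ hcQ)
        have hnorm' : ∀ q ∈ Q ++ [n], snorm q = q := by
          intro q hq
          rcases List.mem_append.mp hq with h | h
          · exact hnorm q h
          · simp only [List.mem_singleton] at h
            rw [h, hn, snorm_idem]
        exact ih (a.insert x x) (Q ++ [n]) hnd' hnorm' (inv_append_diag hinv hx)
      · -- x ≠ y: a1.get? y = a.get? y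
        rw [PySem.Dict.get?_insert, if_neg (fun h => hxy h.symm), hinv y]
        cases hy : lookupQ Q y with
        | none =>
          -- both fresh: insert both ways, append n
          have hyQ : y ∈ charsOf Q → False := fun h => lookupQ_eq_none.mp hy h
          have hnQ : n ∉ Q := fun hnQ => hxQ (mem_charsOf.mpr ⟨n, hnQ, mem_chars2.mp hxn⟩)
          have hadd : PySem.Set.add Q n = Q ++ [n] := PySem.Set.add_of_not_mem hnQ
          rw [hadd]
          have hnd' : (charsOf (Q ++ [n])).Nodup := by
            rw [charsOf_append]
            refine List.Nodup.append hnd ?_ ?_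
            · show (chars2 n ++ []).Nodup
              rw [List.append_nil]
              unfold chars2
              split_ifs with hcc
              · exact List.nodup_singleton _
              · simp [hcc]
            · intro c hcQ hc2
              have hcn : n.1 = c ∨ n.2 = c := mem_chars2.mp (by simpa [charsOf] using hc2)
              have hcxy : c = x ∨ c = y := by
                rcases snorm_cases x y with h | h <;> rw [hn, h] at hcn <;> tauto
              rcases hcxy with rfl | rfl
              · exact hxQ hcQ
              · exact hyQ hcQ
          have hnorm' : ∀ q ∈ Q ++ [n], snorm q = q := by
            intro q hq
            rcases List.mem_append.mp hq with h | h
            · exact hnorm q h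
            · simp only [List.mem_singleton] at h
              rw [h, hn, snorm_idem]
          exact ih ((a.insert x y).insert y x) (Q ++ [n]) hnd' hnorm' (inv_append hinv hx hy)
        | some w =>
          -- y is taken by some q with partner w ≠ x: conflict
          obtain ⟨q, hqQ, hq⟩ := lookupQ_some hy
          have hwx : x ≠ w := by
            rintro rfl
            apply hxQ
            refine mem_charsOf.mpr ⟨q, hqQ, ?_⟩
            rcases hq with ⟨_, h2⟩ | ⟨_, h2⟩
            · right; exact h2
            · left; exact h2
          simp only [ne_eq, if_pos hwx]
          have hyQ : y ∈ charsOf Q := by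
            refine mem_charsOf.mpr ⟨q, hqQ, ?_⟩
            rcases hq with ⟨h1, _⟩ | ⟨h1, _⟩
            · left; exact h1
            · right; exact h1
          have hnQ : n ∉ Q := fun hnQ => hxQ (mem_charsOf.mpr ⟨n, hnQ, mem_chars2.mp hxn⟩)
          have hadd : PySem.Set.add Q n = Q ++ [n] := PySem.Set.add_of_not_mem hnQ
          rw [hadd]
          have hbad : ¬ (charsOf (Q ++ [n])).Nodup := by
            rw [charsOf_append]
            intro hnd2
            have hdisj := List.disjoint_of_nodup_append hnd2
            exact hdisj hyQ (by simpa [charsOf] using hyn)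
          rw [Bool.eq_iff_iff]
          simp [not_nodup_runB hbad rest]

-- B's final test: len(chars) == len(set(chars)) is exactly Nodup ------------

theorem ofList_sublist (l : List Char) : List.Sublist (PySem.Set.ofList l) l := by
  induction l with
  | nil => simp [PySem.Set.ofList_nil]
  | cons x xs ih =>
    rw [PySem.Set.ofList_cons]
    refine List.Sublist.cons₂ x (List.Sublist.trans ?_ ih)
    rw [show PySem.Set.discard (PySem.Set.ofList xs) x
        = (PySem.Set.ofList xs).filter (fun y => !(y == x)) from rfl]
    exact List.filter_sublist

theorem len_eq_iff_nodup (l : List Char) :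
    l.length = (PySem.Set.ofList l).length ↔ l.Nodup := by
  constructor
  · intro h
    have heq := List.Sublist.eq_of_length (ofList_sublist l) h.symm
    have hnd : (PySem.Set.ofList l).Nodup := PySem.Set.nodup_ofList (xs := l)
    rw [heq] at hnd
    exact hnd
  · intro h
    rw [PySem.Set.ofList_eq_self_of_nodup (h := h)]

-- bridge A: the indexed loop over range(0, len, 2) is runA over the pair list

theorem pyGet?_cons_shift {α : Type} (c : α) (l : List α) (i : Int) (h : 0 ≤ i) :
    PySem.List.pyGet? (c :: l) (i + 1) = PySem.List.pyGet? l i := by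
  rcases Int.eq_ofNat_of_zero_le h with ⟨n, rfl⟩
  simp [PySem.List.pyGet?, PySem.List.pyIdx?]
  split_ifs with h1 h2 <;> simp_all <;> omega

theorem pyGet?_cons2_shift {α : Type} (x y : α) (l : List α) (i : Int) (h : 0 ≤ i) :
    PySem.List.pyGet? (x :: y :: l) (i + 2) = PySem.List.pyGet? l i := by
  have h2 : i + 2 = (i + 1) + 1 := by ring
  rw [h2, pyGet?_cons_shift x _ _ (by omega), pyGet?_cons_shift y _ _ h]

theorem pyRange_two_cons (n : Int) (h : 0 ≤ n) :
    PySem.List.pyRange 0 (n + 2) 2 = 0 :: (PySem.List.pyRange 0 n 2).map (· + 2) := by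
  rw [PySem.List.pyRange_of_pos _ _ (by norm_num), PySem.List.pyRange_of_pos _ _ (by norm_num)]
  have hc : ((n + 2 - 0 + 2 - 1) / 2).toNat
      = (if (0 : Int) < n then ((n - 0 + 2 - 1) / 2).toNat else 0) + 1 := by
    split_ifs <;> omega
  rw [if_pos (by omega), hc, List.range_succ_eq_map]
  simp [List.map_map, Function.comp]
  intro a _; ring

theorem loopA_shift (x y : Char) (l : List Char) :
    ∀ (is : List Int), (∀ i ∈ is, 0 ≤ i) → ∀ a,
      loopA (x :: y :: l) (is.map (· + 2)) a = loopA l is a := by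
  intro is
  induction is with
  | nil => intro _ a; rfl
  | cons i rest ih =>
    intro hpos a
    have hi : (0:Int) ≤ i := hpos i (by simp)
    have h1 : PySem.List.pyGet? (x :: y :: l) (i + 2) = PySem.List.pyGet? l i :=
      pyGet?_cons2_shift x y l i hi
    have h2 : PySem.List.pyGet? (x :: y :: l) (i + 2 + 1) = PySem.List.pyGet? l (i + 1) := by
      have h3 : i + 2 + 1 = (i + 1) + 2 := by ring
      rw [h3]; exact pyGet?_cons2_shift x y l (i+1) (by omega)
    have ih' : ∀ a, loopA (x :: y :: l) (rest.map (· + 2)) a = loopA l rest a :=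
      fun a => ih (fun j hj => hpos j (by simp [hj])) a
    simp only [List.map_cons, loopA, h1, h2, ih']

theorem loopA_pairs : ∀ (l : List Char), l.length % 2 = 0 → ∀ a,
    loopA l (PySem.List.pyRange 0 (l.length : Int) 2) a = runA (pairsOf l) a
  | [], _, a => by
    simp [PySem.List.pyRange_of_pos 0 0 (by norm_num : (0:Int) < 2), loopA, pairsOf, runA]
  | [x], h, a => by simp at h
  | x :: y :: l, h, a => by
    have hn : (0:Int) ≤ l.length := by positivity
    have hlen : ((x :: y :: l).length : Int) = (l.length : Int) + 2 := by simp; ring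
    rw [hlen, pyRange_two_cons _ hn]
    have hpos : ∀ i ∈ PySem.List.pyRange 0 (l.length : Int) 2, 0 ≤ i := by
      intro i hi
      exact ((PySem.List.mem_pyRange_iff_of_pos (by norm_num) i).mp hi).1
    have h0 : PySem.List.pyGet? (x :: y :: l) 0 = some x := by
      simp [PySem.List.pyGet?, PySem.List.pyIdx?]
      rw [if_pos (by positivity : (0:Int) ≤ (l.length : Int) + 1)]
      rfl
    have h1 : PySem.List.pyGet? (x :: y :: l) (0 + 1) = some y := by
      simp [PySem.List.pyGet?, PySem.List.pyIdx?]
    have hrest : l.length % 2 = 0 := by simp at h; omega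
    have ih := loopA_pairs l hrest
    simp only [loopA, h0, h1, loopA_shift x y l _ hpos, ih]
    show _ = runA ((x, y) :: pairsOf l) a
    simp only [runA, halfA]
    cases a.get? x with
    | none =>
      simp only []
      cases (a.insert x y).get? y with
      | none => rfl
      | some w => by_cases hw : x = w <;> simp [hw]
    | some v =>
      by_cases hv : y = v
      · subst hv
        simp only [ne_eq, not_true_eq_false, if_false]
        cases a.get? y with
        | none => rfl
        | some w => by_cases hw : x = w <;> simp [hw]
      · simp [hv]

-- bridge B: the set-building fold over range(0, len, 2) is runB over the pair list

def stepBf (cs : List Char) (s : PySem.Set (Char × Char)) (i : Int) : PySem.Set (Char × Char) :=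
  match PySem.List.pyGet? cs i, PySem.List.pyGet? cs (i + 1) with
  | some x, some y => PySem.Set.add s (normPair x y)
  | _, _ => s

theorem foldB_shift (x y : Char) (l : List Char) :
    ∀ (is : List Int), (∀ i ∈ is, 0 ≤ i) → ∀ s,
      (is.map (· + 2)).foldl (stepBf (x :: y :: l)) s = is.foldl (stepBf l) s := by
  intro is
  induction is with
  | nil => intro _ s; rfl
  | cons i rest ih =>
    intro hpos s
    have hi : (0:Int) ≤ i := hpos i (by simp)
    have hstep : stepBf (x :: y :: l) s (i + 2) = stepBf l s i := by
      unfold stepBf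
      rw [pyGet?_cons2_shift x y l i hi, show i + 2 + 1 = (i + 1) + 2 by ring,
        pyGet?_cons2_shift x y l (i + 1) (by omega)]
    simp only [List.map_cons, List.foldl_cons, hstep]
    exact ih (fun j hj => hpos j (by simp [hj])) _

theorem foldB_pairs : ∀ (l : List Char), l.length % 2 = 0 → ∀ s,
    (PySem.List.pyRange 0 (l.length : Int) 2).foldl (stepBf l) s = runB (pairsOf l) s
  | [], _, s => by
    simp [PySem.List.pyRange_of_pos 0 0 (by norm_num : (0:Int) < 2), pairsOf, runB]
  | [x], h, s => by simp at h
  | x :: y :: l, h, s => by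
    have hn : (0:Int) ≤ l.length := by positivity
    have hlen : ((x :: y :: l).length : Int) = (l.length : Int) + 2 := by simp; ring
    rw [hlen, pyRange_two_cons _ hn]
    have hpos : ∀ i ∈ PySem.List.pyRange 0 (l.length : Int) 2, 0 ≤ i := by
      intro i hi
      exact ((PySem.List.mem_pyRange_iff_of_pos (by norm_num) i).mp hi).1
    have h0 : PySem.List.pyGet? (x :: y :: l) 0 = some x := by
      simp [PySem.List.pyGet?, PySem.List.pyIdx?]
      rw [if_pos (by positivity : (0:Int) ≤ (l.length : Int) + 1)]
      rfl
    have h1 : PySem.List.pyGet? (x :: y :: l) (0 + 1) = some y := by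
      simp [PySem.List.pyGet?, PySem.List.pyIdx?]
    have hrest : l.length % 2 = 0 := by simp at h; omega
    have hstep0 : stepBf (x :: y :: l) s 0 = PySem.Set.add s (snorm (x, y)) := by
      unfold stepBf
      rw [h0, h1]
      simp only [normPair_eq_snorm]
    rw [List.foldl_cons, hstep0, foldB_shift x y l _ hpos, foldB_pairs l hrest]
    rfl

-- ===== VERDICT (by name: the statement is the Claim_ definition above) =====
theorem isUnequivocal_spec : Claim_equal_isUnequivocal := by
  intro text _
  unfold Spec_isUnequivocal isUnequivocal isUnequivocal_alt
  have hlen : PySem.Str.len text = (text.toList.length : Int) := rfl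
  rw [hlen]
  by_cases hpar : text.toList.length % 2 = 0
  · have hodd : (((text.toList.length : Int) % 2 == 1) : Bool) = false := by
      simp only [beq_eq_false_iff_ne, ne_eq]
      omega
    rw [hodd]
    simp only [Bool.false_eq_true, if_false]
    rw [loopA_pairs text.toList hpar PySem.Dict.empty]
    have hB : (PySem.List.pyRange 0 ((text.toList.length : Nat) : Int) 2).foldl
        (stepBf text.toList) PySem.Set.empty = runB (pairsOf text.toList) [] :=
      foldB_pairs text.toList hpar PySem.Set.empty
    rw [show (PySem.List.pyRange 0 ((text.toList.length : Nat) : Int) 2).foldl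
        (fun s i =>
          match PySem.List.pyGet? text.toList i, PySem.List.pyGet? text.toList (i + 1) with
          | some x, some y => PySem.Set.add s (normPair x y)
          | _, _ => s) PySem.Set.empty
      = (PySem.List.pyRange 0 ((text.toList.length : Nat) : Int) 2).foldl
        (stepBf text.toList) PySem.Set.empty from rfl, hB]
    have hcore := core (pairsOf text.toList) PySem.Dict.empty []
      (by simp [charsOf]) (by simp) (fun c => rfl)
    rw [hcore]
    rw [show (runB (pairsOf text.toList) []).flatMap chars2
        = charsOf (runB (pairsOf text.toList) []) from rfl]
    rw [decide_eq_decide]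
    exact (len_eq_iff_nodup _).symm
  · have hodd : (((text.toList.length : Int) % 2 == 1) : Bool) = true := by
      simp only [beq_iff_eq]
      omega
    rw [hodd]
    simp
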